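-- pv_equiv track=rewrite | github.com/h4wwk3ye/code | Hackerearth/Dynamic Programming/Graph/BFS/social_networking.py | solve
-- ===== SOURCE A (Python) =====
-- def solve(Graph, u, l, n):
--     count = 0
--     depth = [0 for _ in range(n + 1)]
--     visited = [False for _ in range(n + 1)]
--     depth[u] = 0
--     visited[u] = True
--     from collections import deque
--     queue = deque()
--     queue.append(u)
--     while len(queue) != 0:
--         node = queue.popleft()
--         for neighbour in Graph[node]:
--             if visited[neighbour] == False:
--                 visited[neighbour] = True
--                 queue.append(neighbour)
--                 depth[neighbour] = 1 + depth[node]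
--                 if depth[neighbour] == l:
--                     count += 1
--                 # elif depth[neighbour] > l:
--                     # return count
--     return count
-- ===== SOURCE B (Python) =====
-- def solve(Graph, u, l, n):
--     # no queue, no depth array, no per-node counting: relax the reachable ball to its
--     # fixpoint by whole-ball rounds, recording the ball's size after each round; the
--     # nodes at distance exactly l are the l-th growth, sizes[l] - sizes[l - 1]
--     visited = [False] * (n + 1)
--     visited[u] = True
--     ball = [u]
--     sizes = [1]
--     grew = True
--     while grew:
--         grew = False
--         for x in list(ball):
--             for v in Graph[x]:
--                 if not visited[v]:
--                     visited[v] = True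
--                     ball.append(v)
--                     grew = True
--         sizes.append(len(ball))
--     if 1 <= l < len(sizes):
--         return sizes[l] - sizes[l - 1]
--     return 0
-- ===== Notes on version B (the rewrite author's own statement) =====
-- stated objective: alternative
-- what changed: A's per-node queue BFS with a depth array and a running count is replaced by a whole-ball fixpoint relaxation that keeps only the visited array and the ball list, records the ball's size after each round, and reads the answer off the size history as sizes[l] - sizes[l-1].
-- outside the precondition, e.g. on solve({0: [1], 1: [-3]}, 0, 3, 2): A returns 0, B returns 0
import Mathlib
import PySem

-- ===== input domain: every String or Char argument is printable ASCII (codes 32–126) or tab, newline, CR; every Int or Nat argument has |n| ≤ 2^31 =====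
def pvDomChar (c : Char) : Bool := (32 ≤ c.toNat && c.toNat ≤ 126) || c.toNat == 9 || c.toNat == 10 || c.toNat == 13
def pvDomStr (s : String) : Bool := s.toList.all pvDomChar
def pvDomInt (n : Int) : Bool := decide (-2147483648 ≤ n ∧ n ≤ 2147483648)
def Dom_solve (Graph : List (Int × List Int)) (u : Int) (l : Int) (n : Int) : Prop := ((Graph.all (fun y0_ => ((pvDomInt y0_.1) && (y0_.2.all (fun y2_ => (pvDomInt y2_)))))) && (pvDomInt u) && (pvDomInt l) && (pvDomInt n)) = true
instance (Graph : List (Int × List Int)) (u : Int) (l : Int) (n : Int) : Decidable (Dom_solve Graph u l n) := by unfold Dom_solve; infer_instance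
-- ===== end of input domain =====

-- B replaces A's queue BFS (depth array + deque + running count) by a ball-to-fixpoint
-- relaxation: whole-ball rounds grow the visited ball until it stops growing, only the
-- ball's size after each round is recorded, and the answer is read off the size history
-- as sizes[l] - sizes[l-1]; a different decomposition of similar cost, not faster.


-- shared transliteration of the expression `Graph[node]` (a dict lookup); where the key is
-- missing Python raises KeyError — under Pre_solve every node either program looks up is a key
def pyNbrs (Graph : List (Int × List Int)) (node : Int) : List Int :=
  PySem.Dict.getD (PySem.Dict.mk Graph) node []

-- ===== PORT A =====
-- body of `for neighbour in Graph[node]: ...`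
def aVisit (l : Int) (node : Int)
    (st : Int × List Int × List Bool × List Int) (nb : Int) :
    Int × List Int × List Bool × List Int :=
  if PySem.List.pyGetD st.2.2.1 nb false = false then
    let vis' := PySem.List.pySetD st.2.2.1 nb true
    let app' := st.2.2.2 ++ [nb]
    let dep' := PySem.List.pySetD st.2.1 nb (1 + PySem.List.pyGetD st.2.1 node 0)
    let c'   := if PySem.List.pyGetD dep' nb 0 = l then st.1 + 1 else st.1
    (c', dep', vis', app')
  else st

-- `while len(queue) != 0: ...`; state = (count, depth, visited, queue); the neighbours
-- appended while processing one node are collected and joined to the queue's tail.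
def aLoop (Graph : List (Int × List Int)) (l : Int) :
    Nat → Int × List Int × List Bool × List Int → Int
  | 0, st => st.1
  | _ + 1, (c, _, _, []) => c
  | f + 1, (c, dep, vis, node :: rest) =>
    let st := (pyNbrs Graph node).foldl (aVisit l node) (c, dep, vis, [])
    aLoop Graph l f (st.1, st.2.1, st.2.2.1, rest ++ st.2.2.2)

def solve (Graph : List (Int × List Int)) (u : Int) (l : Int) (n : Int) : Int :=
  let depth := List.replicate (n + 1).toNat (0 : Int)
  let visited := List.replicate (n + 1).toNat false
  let depth := PySem.List.pySetD depth u (0 : Int)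
  let visited := PySem.List.pySetD visited u true
  -- fuel: under Pre_solve every dequeued node occupies a fresh visited slot, so the
  -- while loop runs at most n + 2 times (proved below); the fuel only makes it total
  aLoop Graph l (n.toNat + 2) (0, depth, visited, [u])

-- ===== PORT B =====
-- body of `for v in Graph[x]: if not visited[v]: ...`; state = (visited, ball, grew)
def bVisit (st : List Bool × List Int × Bool) (v : Int) : List Bool × List Int × Bool :=
  if PySem.List.pyGetD st.1 v false = false then
    (PySem.List.pySetD st.1 v true, st.2.1 ++ [v], true)
  else st

-- one whole-ball round: `for x in list(ball): for v in Graph[x]: ...` (snapshot iterate)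
def bRound (Graph : List (Int × List Int)) (vis : List Bool) (ball : List Int) :
    List Bool × List Int × Bool :=
  ball.foldl (fun st x => (pyNbrs Graph x).foldl bVisit st) (vis, ball, false)

-- `while grew: ... sizes.append(len(ball))`
def bLoop (Graph : List (Int × List Int)) :
    Nat → List Bool → List Int → List Int → List Int
  | 0, _, _, sizes => sizes
  | f + 1, vis, ball, sizes =>
    let st := bRound Graph vis ball
    let sizes' := sizes ++ [(st.2.1.length : Int)]
    if st.2.2 then bLoop Graph f st.1 st.2.1 sizes' else sizes'

def solve_alt (Graph : List (Int × List Int)) (u : Int) (l : Int) (n : Int) : Int :=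
  let visited := PySem.List.pySetD (List.replicate (n + 1).toNat false) u true
  -- fuel: every growing round marks a fresh visited slot, so the while loop runs at
  -- most n + 2 times (proved below); the fuel only makes the port total
  let sizes := bLoop Graph (n.toNat + 2) visited [u] [1]
  if 1 ≤ l ∧ l < (sizes.length : Int) then
    PySem.List.pyGetD sizes l 0 - PySem.List.pyGetD sizes (l - 1) 0
  else 0

-- ===== PRECONDITION & SPEC =====
-- the labels reachable from u through the adjacency lists: iterate 'add all neighbours
-- of current members' often enough to reach the fixpoint (proved below)
def expandR (Graph : List (Int × List Int)) (s : PySem.Set Int) : PySem.Set Int :=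
  PySem.Set.update s (s.flatMap (fun x => pyNbrs Graph x))

def reachN (Graph : List (Int × List Int)) : Nat → PySem.Set Int → PySem.Set Int
  | 0, s => s
  | k + 1, s => reachN Graph k (expandR Graph s)

def ReachSet (Graph : List (Int × List Int)) (u : Int) : PySem.Set Int :=
  reachN Graph ((Graph.flatMap (fun p => p.2)).length + 1) (PySem.Set.ofList [u])

-- Pre_solve excludes the inputs whose reachable closure (labels reachable from u through
-- the adjacency lists) leaves the dict or the index window: on those A raises KeyError /
-- IndexError — except on a few where the offending label is shadowed by an already
-- visited slot before either program touches it, so both still return and agree (cites).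
def Pre_solve (Graph : List (Int × List Int)) (u : Int) (l : Int) (n : Int) : Prop :=
  ∀ x ∈ ReachSet Graph u, (-(n + 1) ≤ x ∧ x ≤ n) ∧
    (PySem.Dict.mk Graph).contains x = true

instance (Graph : List (Int × List Int)) (u : Int) (l : Int) (n : Int) :
    Decidable (Pre_solve Graph u l n) := by unfold Pre_solve; infer_instance

def pvWitness_solve : (List (Int × List Int)) × Int × Int × Int :=
  ([(0, [1]), (1, [0])], 0, 1, 1)

def Spec_solve (Graph : List (Int × List Int)) (u : Int) (l : Int) (n : Int) (out : Int) : Prop :=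
  out = solve_alt Graph u l n
instance (Graph : List (Int × List Int)) (u : Int) (l : Int) (n : Int) (out : Int) :
    Decidable (Spec_solve Graph u l n out) := by unfold Spec_solve; infer_instance

-- ===== CLAIM (what is proved, stated in full; the proofs are below) =====
def Claim_equal_solve : Prop := ∀ (Graph : List (Int × List Int)) (u : Int) (l : Int) (n : Int), Dom_solve Graph u l n → Pre_solve Graph u l n → Spec_solve Graph u l n (solve Graph u l n)


-- ===== LEMMAS AND PROOFS =====

-- x is inside Python's index window for a list of length n + 1
def InW (n x : Int) : Prop := -(n + 1) ≤ x ∧ x ≤ n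

-- the array slot a window index denotes (negative indices wrap)
def slotOf (n i : Int) : Nat := (if 0 ≤ i then i else i + (n + 1)).toNat

def unvis (vis : List Bool) : Nat := vis.count false

lemma slotOf_lt (n i : Int) (hn : 0 ≤ n) (hi : InW n i) : slotOf n i < (n + 1).toNat := by
  unfold slotOf; unfold InW at hi; split_ifs <;> omega

lemma pyGetD_w {α : Type} (xs : List α) (n i : Int) (d : α)
    (hlen : xs.length = (n + 1).toNat) (hn : 0 ≤ n) (hi : InW n i) :
    PySem.List.pyGetD xs i d = xs.getD (slotOf n i) d := by
  obtain ⟨h1, h2⟩ := hi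
  have hlen' : (xs.length : Int) = n + 1 := by rw [hlen]; omega
  unfold PySem.List.pyGetD PySem.List.pyGet? PySem.List.pyIdx? slotOf
  by_cases h0 : 0 ≤ i
  · rw [if_pos h0, if_pos (by omega), if_pos h0]
    simp [List.getD]
  · rw [if_neg h0, if_pos (by omega)]
    have : xs.length - (-i).toNat = (i + (n + 1)).toNat := by omega
    rw [this, if_neg h0]
    simp [List.getD]

lemma pySetD_w {α : Type} (xs : List α) (n i : Int) (v : α)
    (hlen : xs.length = (n + 1).toNat) (hn : 0 ≤ n) (hi : InW n i) :
    PySem.List.pySetD xs i v = xs.set (slotOf n i) v := by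
  obtain ⟨h1, h2⟩ := hi
  have hlen' : (xs.length : Int) = n + 1 := by rw [hlen]; omega
  unfold PySem.List.pySetD PySem.List.pySet? PySem.List.pyIdx? slotOf
  by_cases h0 : 0 ≤ i
  · rw [if_pos h0, if_pos (by omega), if_pos h0]
    simp
  · rw [if_neg h0, if_pos (by omega)]
    have : xs.length - (-i).toNat = (i + (n + 1)).toNat := by omega
    rw [this, if_neg h0]
    simp

lemma getD_set_nat {α : Type} (xs : List α) (a b : Nat) (v d : α)
    (ha : a < xs.length) :
    (xs.set a v).getD b d = if b = a then v else xs.getD b d := by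
  simp only [List.getD, List.getElem?_set, ha, if_true]
  by_cases h : b = a
  · subst h
    simp
  · rw [if_neg (fun he => h he.symm), if_neg h]

lemma getD_pySetD_w {α : Type} (xs : List α) (n i j : Int) (v d : α)
    (hlen : xs.length = (n + 1).toNat) (hn : 0 ≤ n) (hi : InW n i) (hj : InW n j) :
    PySem.List.pyGetD (PySem.List.pySetD xs i v) j d =
      if slotOf n j = slotOf n i then v else PySem.List.pyGetD xs j d := by
  rw [pySetD_w xs n i v hlen hn hi,
    pyGetD_w _ n j d (by rw [List.length_set, hlen]) hn hj,
    pyGetD_w xs n j d hlen hn hj,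
    getD_set_nat xs (slotOf n i) (slotOf n j) v d (by rw [hlen]; exact slotOf_lt n i hn hi)]

lemma unvis_set_nat (vis : List Bool) (a : Nat) (ha : a < vis.length)
    (hf : vis.getD a false = false) :
    unvis vis = unvis (vis.set a true) + 1 := by
  have hx : vis[a] = false := by rwa [List.getD_eq_getElem vis false ha] at hf
  have h1 : vis.set a true = List.take a vis ++ true :: List.drop (a + 1) vis := by
    rw [List.set_eq_take_append_cons_drop, if_pos ha]
  have h2 : vis = List.take a vis ++ vis[a] :: List.drop (a + 1) vis := by
    conv_lhs => rw [← List.take_append_drop a vis, List.drop_eq_getElem_cons ha]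
  unfold unvis
  rw [h1]; conv_lhs => rw [h2]
  simp [List.count_append, hx]; omega

lemma unvis_pySetD_w (vis : List Bool) (n i : Int)
    (hlen : vis.length = (n + 1).toNat) (hn : 0 ≤ n) (hi : InW n i)
    (hf : PySem.List.pyGetD vis i false = false) :
    unvis vis = unvis (PySem.List.pySetD vis i true) + 1 := by
  rw [pyGetD_w vis n i false hlen hn hi] at hf
  rw [pySetD_w vis n i true hlen hn hi]
  exact unvis_set_nat vis (slotOf n i) (by rw [hlen]; exact slotOf_lt n i hn hi) hf

lemma pyNbrs_pair (Graph : List (Int × List Int)) (x v : Int)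
    (hv : v ∈ pyNbrs Graph x) : ∃ vs, (x, vs) ∈ Graph ∧ v ∈ vs := by
  unfold pyNbrs at hv
  rw [PySem.Dict.getD_eq_get?_getD] at hv
  cases h : PySem.Dict.get? (PySem.Dict.mk Graph) x with
  | none => rw [h] at hv; simp at hv
  | some vs =>
    rw [h] at hv; simp at hv
    exact ⟨vs, PySem.Dict.mem_items_of_get?_eq_some _ h, hv⟩

-- positive-index reads, for the sizes list
lemma pyGetD_nonneg (xs : List Int) (i : Int) (d : Int) (h0 : 0 ≤ i)
    (h1 : i < (xs.length : Int)) :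
    PySem.List.pyGetD xs i d = xs.getD i.toNat d := by
  unfold PySem.List.pyGetD PySem.List.pyGet? PySem.List.pyIdx?
  rw [if_pos h0, if_pos (by omega)]
  simp [List.getD]

lemma pyGetD_append_lt (xs t : List Int) (i : Int) (h0 : 0 ≤ i)
    (h1 : i < (xs.length : Int)) :
    PySem.List.pyGetD (xs ++ t) i 0 = PySem.List.pyGetD xs i 0 := by
  rw [pyGetD_nonneg (xs ++ t) i 0 h0 (by simp; omega), pyGetD_nonneg xs i 0 h0 h1]
  simp only [List.getD]
  rw [List.getElem?_append_left (by omega)]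

lemma pyGetD_append_self (xs : List Int) (a : Int) (i : Int)
    (hi : i = (xs.length : Int)) :
    PySem.List.pyGetD (xs ++ [a]) i 0 = a := by
  rw [pyGetD_nonneg (xs ++ [a]) i 0 (by omega) (by simp; omega)]
  have : i.toNat = xs.length := by omega
  rw [this]
  simp [List.getD]

-- ----- the reachable set: basic facts and the fixpoint -----

lemma mem_expandR (Graph : List (Int × List Int)) (s : PySem.Set Int) (y : Int) :
    y ∈ expandR Graph s ↔ y ∈ s ∨ ∃ x ∈ s, y ∈ pyNbrs Graph x := by
  unfold expandR
  rw [PySem.Set.mem_update]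
  simp [List.mem_flatMap]

lemma nodup_expandR (Graph : List (Int × List Int)) (s : PySem.Set Int)
    (h : s.Nodup) : (expandR Graph s).Nodup :=
  PySem.Set.nodup_update s _ h

lemma subset_reachN (Graph : List (Int × List Int)) :
    ∀ (k : Nat) (s : PySem.Set Int) (x : Int), x ∈ s → x ∈ reachN Graph k s := by
  intro k
  induction k with
  | zero => intro s x hx; exact hx
  | succ k ih =>
    intro s x hx
    exact ih (expandR Graph s) x ((mem_expandR Graph s x).mpr (Or.inl hx))

lemma reachN_of_fix (Graph : List (Int × List Int)) (s : PySem.Set Int)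
    (h : expandR Graph s = s) : ∀ k, reachN Graph k s = s := by
  intro k
  induction k with
  | zero => rfl
  | succ k ih =>
    show reachN Graph k (expandR Graph s) = s
    rw [h, ih]

lemma nodup_length_le {l1 l2 : List Int} (h1 : l1.Nodup) (hsub : ∀ x ∈ l1, x ∈ l2) :
    l1.length ≤ l2.length := by
  have h3 : l1.toFinset ⊆ l2.toFinset := by
    intro a ha
    rw [List.mem_toFinset] at ha ⊢
    exact hsub a ha
  calc l1.length = l1.toFinset.card := (List.toFinset_card_of_nodup h1).symm
    _ ≤ l2.toFinset.card := Finset.card_le_card h3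
    _ ≤ l2.length := l2.toFinset_card_le

lemma expandR_grows (Graph : List (Int × List Int)) (s : PySem.Set Int)
    (h : expandR Graph s ≠ s) : s.length + 1 ≤ (expandR Graph s).length := by
  have he : expandR Graph s = s ++ (PySem.Set.ofList (s.flatMap (fun x => pyNbrs Graph x))).filter
      (fun y => !(PySem.Set.contains s y)) := by
    unfold expandR
    exact PySem.Set.update_eq_append_filter s _
  rw [he] at h ⊢
  cases hl : (PySem.Set.ofList (s.flatMap (fun x => pyNbrs Graph x))).filter
      (fun y => !(PySem.Set.contains s y)) with
  | nil => rw [hl] at h; simp at h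
  | cons a t => simp [List.length_append]

lemma pyNbrs_subset_all (Graph : List (Int × List Int)) (x v : Int)
    (hv : v ∈ pyNbrs Graph x) : v ∈ Graph.flatMap (fun p => p.2) := by
  obtain ⟨vs, hp, hm⟩ := pyNbrs_pair Graph x v hv
  exact List.mem_flatMap.mpr ⟨(x, vs), hp, hm⟩

lemma reachN_fix (Graph : List (Int × List Int)) (D : List Int)
    (hND : ∀ x ∈ Graph.flatMap (fun p => p.2), x ∈ D) :
    ∀ (k : Nat) (s : PySem.Set Int), s.Nodup → (∀ x ∈ s, x ∈ D) →
    D.length + 1 ≤ k + s.length →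
    expandR Graph (reachN Graph k s) = reachN Graph k s := by
  intro k
  induction k with
  | zero =>
    intro s hnd hsub hk
    have := nodup_length_le hnd hsub
    omega
  | succ k ih =>
    intro s hnd hsub hk
    by_cases he : expandR Graph s = s
    · have h1 : reachN Graph (k + 1) s = s := reachN_of_fix Graph s he (k + 1)
      rw [h1, he]
    · show expandR Graph (reachN Graph k (expandR Graph s)) = reachN Graph k (expandR Graph s)
      refine ih (expandR Graph s) (nodup_expandR Graph s hnd) ?_ ?_
      · intro x hx
        rcases (mem_expandR Graph s x).mp hx with h | ⟨y, _, hyv⟩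
        · exact hsub x h
        · exact hND x (pyNbrs_subset_all Graph y x hyv)
      · have := expandR_grows Graph s he
        omega

lemma reach_mem_self (Graph : List (Int × List Int)) (u : Int) :
    u ∈ ReachSet Graph u := by
  unfold ReachSet
  exact subset_reachN Graph _ _ u (by simp [PySem.Set.ofList])

lemma reach_closed (Graph : List (Int × List Int)) (u : Int) :
    ∀ x ∈ ReachSet Graph u, ∀ v ∈ pyNbrs Graph x, v ∈ ReachSet Graph u := by
  intro x hx v hv
  have hfix : expandR Graph (ReachSet Graph u) = ReachSet Graph u := by
    unfold ReachSet
    refine reachN_fix Graph (u :: Graph.flatMap (fun p => p.2))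
      (fun x hx => by simp [hx]) _ (PySem.Set.ofList [u]) (PySem.Set.nodup_ofList _) ?_ ?_
    · intro y hy
      rw [PySem.Set.mem_ofList] at hy
      simp at hy
      simp [hy]
    · simp [PySem.Set.ofList, PySem.Set.add]
  rw [← hfix]
  exact (mem_expandR Graph _ v).mpr (Or.inr ⟨x, hx, hv⟩)

-- ----- the coupled simulation, relative to a set R of well-behaved labels -----
-- (in the verdict R is the reachable closure: in-window and neighbour-closed)

-- a node whose neighbours are all visited contributes nothing to a B round
lemma bfold_noop : ∀ (adjl : List Int) (vis : List Bool) (ball : List Int) (grew : Bool),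
    (∀ v ∈ adjl, PySem.List.pyGetD vis v false = true) →
    adjl.foldl bVisit (vis, ball, grew) = (vis, ball, grew) := by
  intro adjl
  induction adjl with
  | nil => intro vis ball grew _; rfl
  | cons a tl ih =>
    intro vis ball grew h
    have ha := h a (by simp)
    have hstep : bVisit (vis, ball, grew) a = (vis, ball, grew) := by
      simp [bVisit, ha]
    simp only [List.foldl_cons, hstep]
    exact ih vis ball grew (fun v hv => h v (by simp [hv]))

lemma done_noop (Graph : List (Int × List Int)) :
    ∀ (ds : List Int) (vis : List Bool) (ball : List Int) (grew : Bool),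
    (∀ x ∈ ds, ∀ v ∈ pyNbrs Graph x, PySem.List.pyGetD vis v false = true) →
    ds.foldl (fun st x => (pyNbrs Graph x).foldl bVisit st) (vis, ball, grew) =
      (vis, ball, grew) := by
  intro ds
  induction ds with
  | nil => intro vis ball grew _; rfl
  | cons d tl ih =>
    intro vis ball grew h
    simp only [List.foldl_cons, bfold_noop (pyNbrs Graph d) vis ball grew (h d (by simp))]
    exact ih vis ball grew (fun x hx => h x (by simp [hx]))

-- one dequeued node: A's fold over its adjacency list, coupled with B's
lemma inner_sim (R : List Int) (l dlev node n : Int)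
    (hRin : ∀ x ∈ R, InW n x) (hn : node ∈ R) (hnn : 0 ≤ n) :
    ∀ (adjl : List Int), (∀ v ∈ adjl, v ∈ R) →
    ∀ (c : Int) (dep : List Int) (vis : List Bool) (app : List Int),
    vis.length = (n + 1).toNat → dep.length = (n + 1).toNat →
    PySem.List.pyGetD vis node false = true →
    PySem.List.pyGetD dep node 0 = dlev →
    ∃ (newl : List Int) (dep' : List Int) (vis' : List Bool),
      adjl.foldl (aVisit l node) (c, dep, vis, app) =
        (c + (if dlev + 1 = l then (newl.length : Int) else 0), dep', vis', app ++ newl) ∧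
      (∀ (ball : List Int) (grew : Bool),
        adjl.foldl bVisit (vis, ball, grew) =
          (vis', ball ++ newl, grew || !newl.isEmpty)) ∧
      vis'.length = (n + 1).toNat ∧ dep'.length = (n + 1).toNat ∧
      (∀ x : Int, InW n x → PySem.List.pyGetD vis x false = true →
        PySem.List.pyGetD vis' x false = true ∧
        PySem.List.pyGetD dep' x 0 = PySem.List.pyGetD dep x 0) ∧
      (∀ x ∈ newl, x ∈ R ∧ PySem.List.pyGetD dep' x 0 = dlev + 1 ∧
        PySem.List.pyGetD vis' x false = true) ∧
      (∀ v ∈ adjl, PySem.List.pyGetD vis' v false = true) ∧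
      unvis vis = unvis vis' + newl.length := by
  intro adjl
  induction adjl with
  | nil =>
    intro _ c dep vis app hlv hld hvn hdn
    exact ⟨[], dep, vis, by simp, fun ball grew => by simp, hlv, hld,
      fun x _ hx => ⟨hx, rfl⟩, by simp, by simp, by simp [unvis]⟩
  | cons nb tl ih =>
    intro hr c dep vis app hlv hld hvn hdn
    have hnb : nb ∈ R := hr nb (by simp)
    have hnbw : InW n nb := hRin nb hnb
    have hnw : InW n node := hRin node hn
    by_cases hv : PySem.List.pyGetD vis nb false = false
    · -- neighbour not yet visited: mark its slot and append it
      have hsne : slotOf n node ≠ slotOf n nb := fun he => by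
        rw [pyGetD_w vis n node false hlv hnn hnw, he,
          ← pyGetD_w vis n nb false hlv hnn hnbw, hv] at hvn
        exact absurd hvn (by simp)
      set dep₁ := PySem.List.pySetD dep nb (1 + dlev) with hdep₁
      set vis₁ := PySem.List.pySetD vis nb true with hvis₁
      set c₁ := if 1 + dlev = l then c + 1 else c with hc₁
      have hA : aVisit l node (c, dep, vis, app) nb = (c₁, dep₁, vis₁, app ++ [nb]) := by
        simp only [aVisit, hv, if_true, hdn]
        rw [getD_pySetD_w dep n nb nb (1 + dlev) 0 hld hnn hnbw hnbw, if_pos rfl]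
      have hB : ∀ (ball : List Int) (grew : Bool),
          bVisit (vis, ball, grew) nb = (vis₁, ball ++ [nb], true) := by
        intro ball grew
        simp [bVisit, hv, hvis₁]
      have hlv₁ : vis₁.length = (n + 1).toNat := by
        rw [hvis₁, PySem.List.length_pySetD, hlv]
      have hld₁ : dep₁.length = (n + 1).toNat := by
        rw [hdep₁, PySem.List.length_pySetD, hld]
      have hvn₁ : PySem.List.pyGetD vis₁ node false = true := by
        rw [hvis₁, getD_pySetD_w vis n nb node true false hlv hnn hnbw hnw, if_neg hsne]
        exact hvn
      have hdn₁ : PySem.List.pyGetD dep₁ node 0 = dlev := by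
        rw [hdep₁, getD_pySetD_w dep n nb node (1 + dlev) 0 hld hnn hnbw hnw, if_neg hsne]
        exact hdn
      have hvnb₁ : PySem.List.pyGetD vis₁ nb false = true := by
        rw [hvis₁, getD_pySetD_w vis n nb nb true false hlv hnn hnbw hnbw, if_pos rfl]
      obtain ⟨newl', dep', vis', e1, e2, e3, e4, e6, e7, eadj, e8⟩ :=
        ih (fun v hv => hr v (by simp [hv])) c₁ dep₁ vis₁ (app ++ [nb])
          hlv₁ hld₁ hvn₁ hdn₁
      have hpres : ∀ x : Int, InW n x → PySem.List.pyGetD vis x false = true →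
          PySem.List.pyGetD vis' x false = true ∧
          PySem.List.pyGetD dep' x 0 = PySem.List.pyGetD dep x 0 := by
        intro x hxw hxv
        have hxne : slotOf n x ≠ slotOf n nb := fun he => by
          rw [pyGetD_w vis n x false hlv hnn hxw, he,
            ← pyGetD_w vis n nb false hlv hnn hnbw, hv] at hxv
          exact absurd hxv (by simp)
        have hv1 : PySem.List.pyGetD vis₁ x false = true := by
          rw [hvis₁, getD_pySetD_w vis n nb x true false hlv hnn hnbw hxw, if_neg hxne]
          exact hxv
        have hd1 : PySem.List.pyGetD dep₁ x 0 = PySem.List.pyGetD dep x 0 := by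
          rw [hdep₁, getD_pySetD_w dep n nb x (1 + dlev) 0 hld hnn hnbw hxw, if_neg hxne]
        obtain ⟨hp1, hp2⟩ := e6 x hxw hv1
        exact ⟨hp1, by rw [hp2, hd1]⟩
      refine ⟨nb :: newl', dep', vis', ?_, ?_, e3, e4, hpres, ?_, ?_, ?_⟩
      · simp only [List.foldl_cons, hA, e1]
        have harr : (app ++ [nb]) ++ newl' = app ++ (nb :: newl') := by simp
        rw [harr]
        congr 1
        by_cases hc : dlev + 1 = l
        · rw [hc₁, if_pos (by omega), if_pos hc, if_pos hc]
          simp only [List.length_cons]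
          push_cast; ring
        · rw [hc₁, if_neg (by omega), if_neg hc, if_neg hc]
      · intro ball grew
        simp only [List.foldl_cons, hB ball grew, e2 (ball ++ [nb]) true]
        simp
      · intro x hx
        rcases List.mem_cons.mp hx with rfl | hx'
        · have hd1 : PySem.List.pyGetD dep₁ x 0 = 1 + dlev := by
            rw [hdep₁, getD_pySetD_w dep n x x (1 + dlev) 0 hld hnn hnbw hnbw, if_pos rfl]
          obtain ⟨hp1, hp2⟩ := e6 x hnbw hvnb₁
          exact ⟨hnb, by rw [hp2, hd1]; ring, hp1⟩
        · exact e7 x hx'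
      · intro v hvm
        rcases List.mem_cons.mp hvm with rfl | hv'
        · exact (e6 v hnbw hvnb₁).1
        · exact eadj v hv'
      · have h1 : unvis vis = unvis vis₁ + 1 := by
          rw [hvis₁]; exact unvis_pySetD_w vis n nb hlv hnn hnbw hv
        rw [h1, e8]; simp; omega
    · -- neighbour already visited: both skip
      have hvt : PySem.List.pyGetD vis nb false = true := by
        revert hv; cases (PySem.List.pyGetD vis nb false) <;> simp
      have hA : aVisit l node (c, dep, vis, app) nb = (c, dep, vis, app) := by
        simp [aVisit, hvt]
      have hB : ∀ (ball : List Int) (grew : Bool),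
          bVisit (vis, ball, grew) nb = (vis, ball, grew) := by
        intro ball grew
        simp [bVisit, hvt]
      obtain ⟨newl', dep', vis', e1, e2, e3, e4, e6, e7, eadj, e8⟩ :=
        ih (fun v hv => hr v (by simp [hv])) c dep vis app hlv hld hvn hdn
      refine ⟨newl', dep', vis', ?_, ?_, e3, e4, e6, e7, ?_, e8⟩
      · simp only [List.foldl_cons, hA, e1]
      · intro ball grew
        simp only [List.foldl_cons, hB ball grew, e2 ball grew]
      · intro v hvm
        rcases List.mem_cons.mp hvm with rfl | hv'
        · exact (e6 v hnbw hvt).1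
        · exact eadj v hv'

-- one whole BFS level of A, coupled with B's fold over the same frontier
lemma level_sim (Graph : List (Int × List Int)) (R : List Int) (n l dlev u : Int)
    (hRin : ∀ x ∈ R, InW n x)
    (hRcl : ∀ x ∈ R, ∀ v ∈ pyNbrs Graph x, v ∈ R)
    (hnn : 0 ≤ n) (huw : u ∈ R) :
    ∀ (fr : List Int) (f : Nat) (c : Int) (dep : List Int) (vis : List Bool)
      (nxt : List Int),
    vis.length = (n + 1).toNat → dep.length = (n + 1).toNat →
    PySem.List.pyGetD vis u false = true →
    (∀ x ∈ fr, x ∈ R ∧ PySem.List.pyGetD vis x false = true ∧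
      PySem.List.pyGetD dep x 0 = dlev) →
    (∀ x ∈ nxt, x ∈ R ∧ PySem.List.pyGetD vis x false = true ∧
      PySem.List.pyGetD dep x 0 = dlev + 1) →
    ∃ (newl : List Int) (dep' : List Int) (vis' : List Bool),
      aLoop Graph l (fr.length + f) (c, dep, vis, fr ++ nxt) =
        aLoop Graph l f (c + (if dlev + 1 = l then (newl.length : Int) else 0),
          dep', vis', nxt ++ newl) ∧
      (∀ (ball : List Int) (grew : Bool),
        fr.foldl (fun st x => (pyNbrs Graph x).foldl bVisit st) (vis, ball, grew) =
          (vis', ball ++ newl, grew || !newl.isEmpty)) ∧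
      vis'.length = (n + 1).toNat ∧ dep'.length = (n + 1).toNat ∧
      PySem.List.pyGetD vis' u false = true ∧
      (∀ x ∈ nxt ++ newl, x ∈ R ∧
        PySem.List.pyGetD vis' x false = true ∧
        PySem.List.pyGetD dep' x 0 = dlev + 1) ∧
      (∀ x : Int, InW n x → PySem.List.pyGetD vis x false = true →
        PySem.List.pyGetD vis' x false = true) ∧
      (∀ q ∈ fr, ∀ v ∈ pyNbrs Graph q, PySem.List.pyGetD vis' v false = true) ∧
      unvis vis = unvis vis' + newl.length := by
  intro fr
  induction fr with
  | nil =>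
    intro f c dep vis nxt hlv hld hvu _ hnxt
    exact ⟨[], dep, vis, by simp, fun ball grew => by simp, hlv, hld, hvu,
      by simpa using hnxt, fun x _ hx => hx, by simp, by simp [unvis]⟩
  | cons node fr' ih =>
    intro f c dep vis nxt hlv hld hvu hfr hnxt
    obtain ⟨hnR, hnv, hnd⟩ := hfr node (by simp)
    have hadj : ∀ v ∈ pyNbrs Graph node, v ∈ R := hRcl node hnR
    obtain ⟨newl₀, dep₀, vis₀, a1, b1, l1, l2, p1, n1, nadj, u1⟩ :=
      inner_sim R l dlev node n hRin hnR hnn (pyNbrs Graph node) hadj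
        c dep vis [] hlv hld hnv hnd
    have hstep : aLoop Graph l ((node :: fr').length + f) (c, dep, vis, (node :: fr') ++ nxt) =
        aLoop Graph l (fr'.length + f)
          (c + (if dlev + 1 = l then (newl₀.length : Int) else 0), dep₀, vis₀,
            fr' ++ (nxt ++ newl₀)) := by
      have hfuel : (node :: fr').length + f = (fr'.length + f) + 1 := by
        simp [List.length_cons]; omega
      rw [hfuel]
      show aLoop Graph l ((fr'.length + f) + 1) (c, dep, vis, node :: (fr' ++ nxt)) = _
      simp only [aLoop, a1]
      simp [List.append_assoc]
    have hvu₀ : PySem.List.pyGetD vis₀ u false = true := (p1 u (hRin u huw) hvu).1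
    have hfr' : ∀ x ∈ fr', x ∈ R ∧
        PySem.List.pyGetD vis₀ x false = true ∧
        PySem.List.pyGetD dep₀ x 0 = dlev := by
      intro x hx
      obtain ⟨h1, h3, h4⟩ := hfr x (by simp [hx])
      obtain ⟨h5, h6⟩ := p1 x (hRin x h1) h3
      exact ⟨h1, h5, by rw [h6, h4]⟩
    have hnxt' : ∀ x ∈ nxt ++ newl₀, x ∈ R ∧
        PySem.List.pyGetD vis₀ x false = true ∧
        PySem.List.pyGetD dep₀ x 0 = dlev + 1 := by
      intro x hx
      rcases List.mem_append.mp hx with hx' | hx'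
      · obtain ⟨h1, h3, h4⟩ := hnxt x hx'
        obtain ⟨h5, h6⟩ := p1 x (hRin x h1) h3
        exact ⟨h1, h5, by rw [h6, h4]⟩
      · obtain ⟨h1, h3, h4⟩ := n1 x hx'
        exact ⟨h1, h4, h3⟩
    obtain ⟨newl₁, dep', vis', a2, b2, l3, l4, v2, q2, pres2, madj, u2⟩ :=
      ih f (c + (if dlev + 1 = l then (newl₀.length : Int) else 0)) dep₀ vis₀
        (nxt ++ newl₀) l1 l2 hvu₀ hfr' hnxt'
    refine ⟨newl₀ ++ newl₁, dep', vis', ?_, ?_, l3, l4, v2, ?_, ?_, ?_, ?_⟩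
    · have hst : (c + (if dlev + 1 = l then (newl₀.length : Int) else 0)) +
          (if dlev + 1 = l then (newl₁.length : Int) else 0) =
          c + (if dlev + 1 = l then ((newl₀ ++ newl₁).length : Int) else 0) := by
        by_cases hc : dlev + 1 = l
        · simp only [hc, if_pos, List.length_append]
          push_cast; ring
        · simp [hc]
      rw [hstep, a2, ← hst]
      congr 2
      simp [List.append_assoc]
    · intro ball grew
      simp only [List.foldl_cons, b1 ball grew, b2 (ball ++ newl₀) (grew || !newl₀.isEmpty)]
      have h1 : (ball ++ newl₀) ++ newl₁ = ball ++ (newl₀ ++ newl₁) := by simp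
      have h2 : ((grew || !newl₀.isEmpty) || !newl₁.isEmpty) =
          (grew || !(newl₀ ++ newl₁).isEmpty) := by
        cases newl₀ <;> cases newl₁ <;> simp
      rw [h1, h2]
    · intro x hx
      exact q2 x (by simpa [List.append_assoc] using hx)
    · intro x hxw hxv
      exact pres2 x hxw (p1 x hxw hxv).1
    · intro q hq v hv
      rcases List.mem_cons.mp hq with rfl | hq'
      · have h0 := nadj v hv
        have hvR : v ∈ R := hRcl q hnR v hv
        exact pres2 v (hRin v hvR) h0
      · exact madj q hq' v hv
    · rw [u1, u2]
      simp [List.length_append]; omega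

-- once the level counter has reached l, A adds nothing more
lemma aLoop_done (Graph : List (Int × List Int)) (R : List Int) (n l u : Int)
    (hRin : ∀ x ∈ R, InW n x)
    (hRcl : ∀ x ∈ R, ∀ v ∈ pyNbrs Graph x, v ∈ R)
    (hnn : 0 ≤ n) (huw : u ∈ R) :
    ∀ (f : Nat) (fr : List Int) (c : Int) (dep : List Int) (vis : List Bool) (dlev : Int),
    vis.length = (n + 1).toNat → dep.length = (n + 1).toNat →
    PySem.List.pyGetD vis u false = true →
    (∀ x ∈ fr, x ∈ R ∧ PySem.List.pyGetD vis x false = true ∧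
      PySem.List.pyGetD dep x 0 = dlev) →
    l ≤ dlev → fr.length + unvis vis + 1 ≤ f →
    aLoop Graph l f (c, dep, vis, fr) = c := by
  intro f
  induction f using Nat.strong_induction_on with
  | _ f IH =>
    intro fr c dep vis dlev hlv hld hvu hfr hl hfuel
    cases fr with
    | nil =>
      obtain ⟨f', rfl⟩ : ∃ f', f = f' + 1 := ⟨f - 1, by simp at hfuel; omega⟩
      rfl
    | cons node fr' =>
      have hflen : (node :: fr').length ≤ f := by omega
      obtain ⟨newl, dep', vis', a1, _, l1, l2, v1, q1, _, _, u1⟩ :=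
        level_sim Graph R n l dlev u hRin hRcl hnn huw (node :: fr')
          (f - (node :: fr').length) c dep vis [] hlv hld hvu hfr (by simp)
      have a1' : aLoop Graph l f (c, dep, vis, node :: fr') =
          aLoop Graph l (f - (node :: fr').length) (c, dep', vis', newl) := by
        have hf : f = (node :: fr').length + (f - (node :: fr').length) := by omega
        rw [hf]
        simpa [if_neg (show ¬ dlev + 1 = l by omega)] using a1
      rw [a1']
      exact IH (f - (node :: fr').length) (by simp [List.length_cons]; omega) newl c dep' vis'
        (dlev + 1) l1 l2 v1 (by simpa using q1) (by omega) (by omega)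

-- bLoop only appends to the size history
lemma bLoop_prefix (Graph : List (Int × List Int)) :
    ∀ (f : Nat) (vis : List Bool) (ball : List Int) (sizes : List Int),
    ∃ t, bLoop Graph f vis ball sizes = sizes ++ t := by
  intro f
  induction f with
  | zero => intro vis ball sizes; exact ⟨[], by simp [bLoop]⟩
  | succ f ih =>
    intro vis ball sizes
    show ∃ t, (let st := bRound Graph vis ball;
      let sizes' := sizes ++ [(st.2.1.length : Int)];
      if st.2.2 then bLoop Graph f st.1 st.2.1 sizes' else sizes') = sizes ++ t
    by_cases h : (bRound Graph vis ball).2.2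
    · obtain ⟨t, ht⟩ := ih (bRound Graph vis ball).1 (bRound Graph vis ball).2.1
        (sizes ++ [((bRound Graph vis ball).2.1.length : Int)])
      exact ⟨[((bRound Graph vis ball).2.1.length : Int)] ++ t, by
        simp only [h, if_true, ht, List.append_assoc]⟩
    · exact ⟨[((bRound Graph vis ball).2.1.length : Int)], by simp [h]⟩

-- the main simulation: from a level boundary, A's remaining count equals the value B
-- later reads off the size history
lemma sim_main (Graph : List (Int × List Int)) (R : List Int) (n l u : Int)
    (hRin : ∀ x ∈ R, InW n x)
    (hRcl : ∀ x ∈ R, ∀ v ∈ pyNbrs Graph x, v ∈ R)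
    (hnn : 0 ≤ n) (huw : u ∈ R) :
    ∀ (fA : Nat) (fB : Nat) (fr done : List Int) (c : Int) (dep : List Int)
      (vis : List Bool) (sizes : List Int) (dlev : Int),
    vis.length = (n + 1).toNat → dep.length = (n + 1).toNat →
    PySem.List.pyGetD vis u false = true →
    (∀ x ∈ fr, x ∈ R ∧ PySem.List.pyGetD vis x false = true ∧
      PySem.List.pyGetD dep x 0 = dlev) →
    (∀ x ∈ done, x ∈ R) →
    (∀ x ∈ done, ∀ v ∈ pyNbrs Graph x, PySem.List.pyGetD vis v false = true) →
    (sizes.length : Int) = dlev + 1 →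
    PySem.List.pyGetD sizes dlev 0 = ((done ++ fr).length : Int) →
    0 ≤ dlev → dlev < l →
    fr.length + unvis vis + 1 ≤ fA → unvis vis + 2 ≤ fB →
    aLoop Graph l fA (c, dep, vis, fr) =
      c + (if 1 ≤ l ∧ l < ((bLoop Graph fB vis (done ++ fr) sizes).length : Int) then
        PySem.List.pyGetD (bLoop Graph fB vis (done ++ fr) sizes) l 0 -
          PySem.List.pyGetD (bLoop Graph fB vis (done ++ fr) sizes) (l - 1) 0
      else 0) := by
  intro fA
  induction fA using Nat.strong_induction_on with
  | _ fA IH =>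
    intro fB fr done c dep vis sizes dlev hlv hld hvu hfr hdR hdC hsz1 hsz2 hdlev0 hl hfA hfB
    obtain ⟨fB', rfl⟩ : ∃ g, fB = g + 1 := ⟨fB - 1, by omega⟩
    obtain ⟨newl, dep', vis', a1, b1, l1, l2, v1, q1, pres, nadj, u1⟩ :=
      level_sim Graph R n l dlev u hRin hRcl hnn huw fr
        (fA - fr.length) c dep vis [] hlv hld hvu hfr (by simp)
    have hfA1 : fr.length ≤ fA := by omega
    have a1' : aLoop Graph l fA (c, dep, vis, fr) =
        aLoop Graph l (fA - fr.length)
          (c + (if dlev + 1 = l then (newl.length : Int) else 0), dep', vis', newl) := by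
      have hf : fA = fr.length + (fA - fr.length) := by omega
      rw [hf]
      simpa using a1
    have hround : bRound Graph vis (done ++ fr) =
        (vis', (done ++ fr) ++ newl, !newl.isEmpty) := by
      unfold bRound
      rw [List.foldl_append, done_noop Graph done vis (done ++ fr) false hdC,
        b1 (done ++ fr) false]
      simp
    have hstep : bLoop Graph (fB' + 1) vis (done ++ fr) sizes =
        (if !newl.isEmpty then
          bLoop Graph fB' vis' ((done ++ fr) ++ newl)
            (sizes ++ [(((done ++ fr) ++ newl).length : Int)])
        else sizes ++ [(((done ++ fr) ++ newl).length : Int)]) := by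
      show (let st := bRound Graph vis (done ++ fr);
        let sizes' := sizes ++ [(st.2.1.length : Int)];
        if st.2.2 then bLoop Graph fB' st.1 st.2.1 sizes' else sizes') = _
      rw [hround]
    by_cases hne : newl = []
    · -- no discovery: A's queue empties, B's loop stops with a repeated size
      subst hne
      have hA : aLoop Graph l fA (c, dep, vis, fr) = c := by
        rw [a1']
        obtain ⟨g, hg⟩ : ∃ g, fA - fr.length = g + 1 := ⟨fA - fr.length - 1, by omega⟩
        rw [hg]
        show c + (if dlev + 1 = l then (([] : List Int).length : Int) else 0) = c
        simp
      have hstep0 : bLoop Graph (fB' + 1) vis (done ++ fr) sizes =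
          sizes ++ [((done ++ fr).length : Int)] := by
        rw [hstep]; simp
      rw [hA, hstep0]
      have hlen : ((sizes ++ [((done ++ fr).length : Int)]).length : Int) = dlev + 2 := by
        simp; omega
      by_cases hc : 1 ≤ l ∧ l < ((sizes ++ [((done ++ fr).length : Int)]).length : Int)
      · rw [if_pos hc]
        have hll : l = dlev + 1 := by omega
        have e1 : PySem.List.pyGetD (sizes ++ [((done ++ fr).length : Int)]) l 0 =
            ((done ++ fr).length : Int) := by
          apply pyGetD_append_self
          omega
        have e2 : PySem.List.pyGetD (sizes ++ [((done ++ fr).length : Int)]) (l - 1) 0 =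
            ((done ++ fr).length : Int) := by
          rw [pyGetD_append_lt _ _ _ (by omega) (by omega)]
          have : l - 1 = dlev := by omega
          rw [this, hsz2]
        rw [e1, e2]
        ring
      · rw [if_neg hc]
        ring
    · -- a discovery round
      have hne1 : 1 ≤ newl.length := by
        cases newl with
        | nil => exact absurd rfl hne
        | cons y ys => simp
      have hflag : (!newl.isEmpty) = true := by
        cases newl with
        | nil => exact absurd rfl hne
        | cons y ys => simp
      rw [hstep, if_pos hflag]
      set ball' := (done ++ fr) ++ newl with hball'
      set sizes' := sizes ++ [(ball'.length : Int)] with hsizes'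
      have hsz1' : (sizes'.length : Int) = (dlev + 1) + 1 := by
        rw [hsizes']; simp; omega
      have hsz2' : PySem.List.pyGetD sizes' (dlev + 1) 0 = (ball'.length : Int) := by
        rw [hsizes']
        apply pyGetD_append_self
        omega
      by_cases hdl : dlev + 1 = l
      · -- the discovered level IS level l: A stops counting; the size history is pinned
        rw [a1', if_pos hdl]
        rw [aLoop_done Graph R n l u hRin hRcl hnn huw (fA - fr.length) newl
          (c + (newl.length : Int)) dep' vis' (dlev + 1) l1 l2 v1 (by simpa using q1)
          (by omega) (by omega)]
        obtain ⟨t, ht⟩ := bLoop_prefix Graph fB' vis' ball' sizes'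
        rw [ht]
        have hcond : 1 ≤ l ∧ l < (((sizes' ++ t).length : Int)) := by
          constructor
          · omega
          · simp only [List.length_append]
            push_cast
            omega
        rw [if_pos hcond]
        have e1 : PySem.List.pyGetD (sizes' ++ t) l 0 = (ball'.length : Int) := by
          rw [pyGetD_append_lt _ _ _ (by omega) (by omega), ← hdl, hsz2']
        have e2 : PySem.List.pyGetD (sizes' ++ t) (l - 1) 0 = ((done ++ fr).length : Int) := by
          rw [pyGetD_append_lt _ _ _ (by omega) (by omega), hsizes',
            pyGetD_append_lt _ _ _ (by omega) (by omega)]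
          have : l - 1 = dlev := by omega
          rw [this, hsz2]
        rw [e1, e2, hball']
        push_cast [List.length_append]
        ring
      · -- recurse into the next level
        rw [a1', if_neg hdl, add_zero]
        have hdC' : ∀ x ∈ done ++ fr, ∀ v ∈ pyNbrs Graph x,
            PySem.List.pyGetD vis' v false = true := by
          intro x hx v hv
          rcases List.mem_append.mp hx with hx' | hx'
          · have hxR := hdR x hx'
            have hvR : v ∈ R := hRcl x hxR v hv
            exact pres v (hRin v hvR) (hdC x hx' v hv)
          · exact nadj x hx' v hv
        have hdR' : ∀ x ∈ done ++ fr, x ∈ R := by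
          intro x hx
          rcases List.mem_append.mp hx with hx' | hx'
          · exact hdR x hx'
          · exact (hfr x hx').1
        have hfrne : fr ≠ [] := by
          intro h
          subst h
          have hb := b1 [] false
          simp only [List.foldl_nil, List.nil_append] at hb
          have h2 : ([] : List Int) = newl := congrArg (fun p => p.2.1) hb
          exact hne h2.symm
        have hfrlen : 1 ≤ fr.length := by
          cases fr with
          | nil => exact absurd rfl hfrne
          | cons y ys => simp
        have := IH (fA - fr.length) (by omega) fB' newl (done ++ fr) c dep' vis' sizes'
          (dlev + 1) l1 l2 v1 (by simpa using q1) hdR' hdC' hsz1'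
          (by rw [hsz2']) (by omega) (by omega) (by omega) (by omega)
        rw [this]

-- ===== VERDICT (by name: the statement is the Claim_ definition above) =====
theorem solve_spec : Claim_equal_solve := by
  intro Graph u l n _ hPre
  have hu : u ∈ ReachSet Graph u := reach_mem_self Graph u
  have hRin : ∀ x ∈ ReachSet Graph u, InW n x := fun x hx => (hPre x hx).1
  have hRcl := reach_closed Graph u
  have huw : InW n u := hRin u hu
  have hnn : 0 ≤ n := by
    obtain ⟨h1, h2⟩ := huw
    omega
  show solve Graph u l n = solve_alt Graph u l n
  set R := ReachSet Graph u with hRdef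
  set dep0 := PySem.List.pySetD (List.replicate (n + 1).toNat (0 : Int)) u 0 with hd0
  set vis0 := PySem.List.pySetD (List.replicate (n + 1).toNat false) u true with hv0
  have hlv : vis0.length = (n + 1).toNat := by
    rw [hv0, PySem.List.length_pySetD]; simp
  have hld : dep0.length = (n + 1).toNat := by
    rw [hd0, PySem.List.length_pySetD]; simp
  have hreplb : PySem.List.pyGetD (List.replicate (n + 1).toNat false) u false = false := by
    rw [pyGetD_w _ n u false (by simp) hnn huw]
    simp [List.getD]
  have hvu : PySem.List.pyGetD vis0 u false = true := by
    rw [hv0, getD_pySetD_w _ n u u true false (by simp) hnn huw huw, if_pos rfl]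
  have hdu : PySem.List.pyGetD dep0 u 0 = 0 := by
    rw [hd0, getD_pySetD_w _ n u u 0 0 (by simp) hnn huw huw, if_pos rfl]
  have hfr : ∀ x ∈ [u], x ∈ R ∧ PySem.List.pyGetD vis0 x false = true ∧
      PySem.List.pyGetD dep0 x 0 = 0 := by
    intro x hx
    rcases List.mem_singleton.mp hx with rfl
    exact ⟨hu, hvu, hdu⟩
  have hunv : unvis vis0 + 1 = (n + 1).toNat := by
    have h1 : unvis (List.replicate (n + 1).toNat false) = unvis vis0 + 1 := by
      rw [hv0]
      exact unvis_pySetD_w _ n u (by simp) hnn huw hreplb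
    have h2 : unvis (List.replicate (n + 1).toNat false) = (n + 1).toNat := by
      simp [unvis]
    omega
  rw [show solve Graph u l n = aLoop Graph l (n.toNat + 2) (0, dep0, vis0, [u]) from rfl]
  by_cases hl : l ≤ 0
  · rw [aLoop_done Graph R n l u hRin hRcl hnn hu (n.toNat + 2) [u] 0 dep0 vis0 0
      hlv hld hvu hfr (by omega) (by simp; omega)]
    rw [show solve_alt Graph u l n =
      (if 1 ≤ l ∧ l < ((bLoop Graph (n.toNat + 2) vis0 [u] [1]).length : Int) then
        PySem.List.pyGetD (bLoop Graph (n.toNat + 2) vis0 [u] [1]) l 0 -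
          PySem.List.pyGetD (bLoop Graph (n.toNat + 2) vis0 [u] [1]) (l - 1) 0
      else 0) from rfl]
    rw [if_neg (by omega)]
  · have := sim_main Graph R n l u hRin hRcl hnn hu (n.toNat + 2) (n.toNat + 2) [u] []
      0 dep0 vis0 [1] 0 hlv hld hvu hfr (by simp) (by simp) (by simp)
      (by simp [PySem.List.pyGetD, PySem.List.pyGet?, PySem.List.pyIdx?])
      (by omega) (by omega) (by simp; omega) (by omega)
    rw [this]
    rw [show solve_alt Graph u l n =
      (if 1 ≤ l ∧ l < ((bLoop Graph (n.toNat + 2) vis0 [u] [1]).length : Int) then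
        PySem.List.pyGetD (bLoop Graph (n.toNat + 2) vis0 [u] [1]) l 0 -
          PySem.List.pyGetD (bLoop Graph (n.toNat + 2) vis0 [u] [1]) (l - 1) 0
      else 0) from rfl]
    show 0 + _ = _
    rw [show ([] : List Int) ++ [u] = [u] from rfl]
    ring
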